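-- pv_equiv track=rewrite | github.com/mscherenberg-prodyna/iac-agents | src/iac_agents/agents/terraform_utils.py | is_valid_terraform_content
-- ===== SOURCE A (Python) =====
-- def is_valid_terraform_content(content: str, strict_validation: bool = False) -> bool:
--     """Validate if content appears to be valid Terraform configuration.
--
--     Args:
--         content: Content to validate
--         strict_validation: If True, applies stricter validation rules
--
--     Returns:
--         True if content appears to be valid Terraform
--     """
--     if not content or not content.strip():
--         return False
--
--     content_lower = content.lower()
--     terraform_keywords = ["terraform", "provider", "resource", "variable", "output"]
--     has_terraform_keywords = any(
--         keyword in content_lower for keyword in terraform_keywords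
--     )
--     has_hcl_syntax = any(char in content for char in ["{", "}", "="])
--
--     if strict_validation:
--         # Reject if it contains too much explanatory text
--         lines = content.split("\n")
--         non_comment_lines = [line for line in lines if not line.strip().startswith("#")]
--         if len(non_comment_lines) > 0:
--             text_ratio = sum(
--                 1
--                 for line in non_comment_lines
--                 if "{" not in line and "}" not in line and "=" not in line
--             ) / len(non_comment_lines)
--             if text_ratio > 0.5:  # More than 50% explanatory text
--                 return False
--
--     return has_terraform_keywords and has_hcl_syntax
-- ===== SOURCE B (Python) =====
-- def is_valid_terraform_content(content: str, strict_validation: bool = False) -> bool: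
--     """Validate if content appears to be valid Terraform configuration (single pass)."""
--     if not content.strip():
--         return False
--
--     has_keyword = False
--     has_hcl = False
--     plain = 0   # non-comment lines without any of { } =
--     total = 0   # non-comment lines
--     for line in content.split("\n"):
--         lowered = line.lower()
--         if not has_keyword:
--             has_keyword = any(
--                 k in lowered
--                 for k in ("terraform", "provider", "resource", "variable", "output")
--             )
--         line_hcl = "{" in line or "}" in line or "=" in line
--         has_hcl = has_hcl or line_hcl
--         if not line.strip().startswith("#"):
--             total += 1
--             if not line_hcl:
--                 plain += 1
--
--     if strict_validation and total > 0 and 2 * plain > total: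
--         return False
--
--     return has_keyword and has_hcl
-- ===== Notes on version B (the rewrite author's own statement) =====
-- stated objective: simpler
-- what changed: Collapses A's separate whole-content keyword scan, whole-content HCL-char scan and strict-mode list-building passes (filter + sum comprehension + float ratio) into one pass over the lines that maintains two flags and two integer counters, replacing the float ratio test with the exact integer comparison 2*plain > total.
import Mathlib
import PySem

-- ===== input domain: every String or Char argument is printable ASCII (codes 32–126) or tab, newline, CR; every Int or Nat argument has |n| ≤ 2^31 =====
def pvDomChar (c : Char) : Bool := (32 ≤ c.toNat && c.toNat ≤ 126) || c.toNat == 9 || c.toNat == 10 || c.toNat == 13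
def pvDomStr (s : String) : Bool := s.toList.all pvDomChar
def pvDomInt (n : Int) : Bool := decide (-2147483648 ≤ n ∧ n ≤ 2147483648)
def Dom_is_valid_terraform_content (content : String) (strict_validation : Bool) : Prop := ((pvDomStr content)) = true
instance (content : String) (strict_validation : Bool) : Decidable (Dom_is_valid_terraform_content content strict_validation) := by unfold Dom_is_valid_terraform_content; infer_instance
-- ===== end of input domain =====

-- B merges A's separate scans (keywords, HCL chars, strict-mode line statistics) into one pass
-- over the lines with two flags and two integer counters (integer test instead of a float ratio): simpler.


-- ===== PORT A =====
def is_valid_terraform_content (content : String) (strict_validation : Bool) : Bool :=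
  if content.toList.isEmpty || (PySem.Chars.strip content.toList).isEmpty then false
  else
    let content_lower := PySem.Chars.lower content.toList
    let terraform_keywords : List String := ["terraform", "provider", "resource", "variable", "output"]
    let has_terraform_keywords := terraform_keywords.any (fun kw => PySem.Chars.isIn kw.toList content_lower)
    let has_hcl_syntax := (["{", "}", "="] : List String).any (fun ch => PySem.Chars.isIn ch.toList content.toList)
    if strict_validation then
      let lines := PySem.Chars.splitOn content.toList ['\n']
      let non_comment_lines := lines.filter (fun line => !(PySem.Chars.startswith (PySem.Chars.strip line) ['#']))
      if 0 < non_comment_lines.length then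
        -- Python compares the float sum/len with 0.5; ported as the integer test len < 2*sum,
        -- which is exact (double rounding of sum/len cannot cross 0.5 for machine-size lists)
        let s : Int := (non_comment_lines.map (fun line =>
          if !(PySem.Chars.isIn ['{'] line) && !(PySem.Chars.isIn ['}'] line) && !(PySem.Chars.isIn ['='] line)
          then (1 : Int) else 0)).sum
        if (non_comment_lines.length : Int) < 2 * s then false
        else has_terraform_keywords && has_hcl_syntax
      else has_terraform_keywords && has_hcl_syntax
    else has_terraform_keywords && has_hcl_syntax

-- ===== PORT B =====
def pvAltStep (st : Bool × Bool × Int × Int) (line : List Char) : Bool × Bool × Int × Int :=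
  let lowered := PySem.Chars.lower line
  let hk := if !st.1 then
      (["terraform", "provider", "resource", "variable", "output"] : List String).any
        (fun k => PySem.Chars.isIn k.toList lowered)
    else st.1
  let line_hcl := PySem.Chars.isIn ['{'] line || PySem.Chars.isIn ['}'] line || PySem.Chars.isIn ['='] line
  let hh := st.2.1 || line_hcl
  if !(PySem.Chars.startswith (PySem.Chars.strip line) ['#']) then
    (hk, hh, st.2.2.1 + (if !line_hcl then 1 else 0), st.2.2.2 + 1)
  else
    (hk, hh, st.2.2.1, st.2.2.2)

def is_valid_terraform_content_alt (content : String) (strict_validation : Bool) : Bool :=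
  if (PySem.Chars.strip content.toList).isEmpty then false
  else
    let r := (PySem.Chars.splitOn content.toList ['\n']).foldl pvAltStep (false, false, (0 : Int), (0 : Int))
    if strict_validation && decide ((0 : Int) < r.2.2.2) && decide (r.2.2.2 < 2 * r.2.2.1) then false
    else r.1 && r.2.1

-- ===== PRECONDITION & SPEC =====
def Spec_is_valid_terraform_content (content : String) (strict_validation : Bool) (out : Bool) : Prop := out = is_valid_terraform_content_alt content strict_validation
instance (content : String) (strict_validation : Bool) (out : Bool) : Decidable (Spec_is_valid_terraform_content content strict_validation out) := by unfold Spec_is_valid_terraform_content; infer_instance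

-- ===== CLAIM (what is proved, stated in full; the proofs are below) =====
def Claim_equal_is_valid_terraform_content : Prop := ∀ (content : String) (strict_validation : Bool), Dom_is_valid_terraform_content content strict_validation → Spec_is_valid_terraform_content content strict_validation (is_valid_terraform_content content strict_validation)

-- ===== LEMMAS AND PROOFS =====

-- splitting a char list at '\n', structurally
def splitNl : List Char → List (List Char)
  | [] => [[]]
  | c :: rest => if c = '\n' then [] :: splitNl rest else (splitNl rest).modifyHead (c :: ·)

theorem splitNl_ne_nil (cs : List Char) : splitNl cs ≠ [] := by
  induction cs with
  | nil => simp [splitNl]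
  | cons c rest ih =>
    simp only [splitNl]
    split_ifs
    · simp
    · cases h : splitNl rest with
      | nil => exact absurd h ih
      | cons a t => simp [List.modifyHead]

theorem go_eq_splitNl : ∀ (fuel : Nat) (l cur : List Char) (acc : List (List Char)),
    l.length < fuel →
    PySem.Chars.splitOn.go ['\n'] fuel l cur acc
      = acc.reverse ++ (splitNl l).modifyHead (cur.reverse ++ ·) := by
  intro fuel
  induction fuel with
  | zero => intro l cur acc h; omega
  | succ n ih =>
    intro l cur acc h
    cases l with
    | nil =>
      simp [PySem.Chars.splitOn.go, splitNl, List.modifyHead]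
    | cons c rest =>
      by_cases hc : c = '\n'
      · subst hc
        rw [show PySem.Chars.splitOn.go ['\n'] (n+1) ('\n' :: rest) cur acc
              = PySem.Chars.splitOn.go ['\n'] n rest [] (cur.reverse :: acc) from by
            simp [PySem.Chars.splitOn.go, List.isPrefixOf]]
        rw [ih rest [] (cur.reverse :: acc) (by simpa using h)]
        cases hs : splitNl rest with
        | nil => exact absurd hs (splitNl_ne_nil rest)
        | cons a t => simp [splitNl, hs, List.modifyHead]
      · rw [show PySem.Chars.splitOn.go ['\n'] (n+1) (c :: rest) cur acc
              = PySem.Chars.splitOn.go ['\n'] n rest (c :: cur) acc from by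
            simp [PySem.Chars.splitOn.go, List.isPrefixOf, Ne.symm hc]]
        rw [ih rest (c :: cur) acc (by simpa using h)]
        cases hs : splitNl rest with
        | nil => exact absurd hs (splitNl_ne_nil rest)
        | cons a t => simp [splitNl, hs, hc, List.modifyHead]

theorem splitOn_eq_splitNl (cs : List Char) :
    PySem.Chars.splitOn cs ['\n'] = splitNl cs := by
  rw [show PySem.Chars.splitOn cs ['\n'] = PySem.Chars.splitOn.go ['\n'] (cs.length + 1) cs [] [] from rfl]
  rw [go_eq_splitNl (cs.length + 1) cs [] [] (by omega)]
  cases hs : splitNl cs with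
  | nil => exact absurd hs (splitNl_ne_nil cs)
  | cons a t => simp [List.modifyHead]

-- joining back with '\n'
def joinNl : List (List Char) → List Char
  | [] => []
  | [p] => p
  | p :: q :: t => p ++ '\n' :: joinNl (q :: t)

theorem joinNl_cons (p : List Char) (ps : List (List Char)) (h : ps ≠ []) :
    joinNl (p :: ps) = p ++ '\n' :: joinNl ps := by
  cases ps with
  | nil => exact absurd rfl h
  | cons q t => rfl

theorem joinNl_splitNl (cs : List Char) : joinNl (splitNl cs) = cs := by
  induction cs with
  | nil => rfl
  | cons c rest ih =>
    by_cases hc : c = '\n'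
    · subst hc
      rw [show splitNl ('\n' :: rest) = [] :: splitNl rest from by simp [splitNl]]
      rw [joinNl_cons _ _ (splitNl_ne_nil rest), ih]
      rfl
    · rw [show splitNl (c :: rest) = (splitNl rest).modifyHead (c :: ·) from by simp [splitNl, hc]]
      cases hs : splitNl rest with
      | nil => exact absurd hs (splitNl_ne_nil rest)
      | cons a t =>
        rw [hs] at ih
        cases t with
        | nil =>
          rw [show ((([a] : List (List Char))).modifyHead (c :: ·)) = [c :: a] from rfl]
          rw [show joinNl [c :: a] = c :: a from rfl]
          rw [show joinNl [a] = a from rfl] at ih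
          rw [ih]
        | cons b u =>
          rw [show (((a :: b :: u : List (List Char))).modifyHead (c :: ·)) = (c :: a) :: b :: u from rfl]
          rw [joinNl_cons _ _ (by simp)]
          rw [joinNl_cons _ _ (by simp)] at ih
          rw [show (c :: a) ++ '\n' :: joinNl (b :: u) = c :: (a ++ '\n' :: joinNl (b :: u)) from rfl, ih]

-- an occurrence of a pattern without '\n' cannot straddle a '\n'
theorem prefix_of_append_nl {sub p r : List Char} (hn : '\n' ∉ sub)
    (h : sub <+: p ++ '\n' :: r) : sub <+: p := by
  induction sub generalizing p with
  | nil => exact List.nil_prefix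
  | cons x s ih =>
    cases p with
    | nil =>
      rcases List.cons_prefix_cons.mp h with ⟨hx, _⟩
      exact absurd (hx ▸ List.mem_cons_self) hn
    | cons b p' =>
      rcases List.cons_prefix_cons.mp h with ⟨hx, hs⟩
      exact List.cons_prefix_cons.mpr ⟨hx, ih (fun hm => hn (List.mem_cons_of_mem _ hm)) hs⟩

theorem infix_append_nl {sub p r : List Char} (hn : '\n' ∉ sub) :
    sub <:+: p ++ '\n' :: r ↔ sub <:+: p ∨ sub <:+: r := by
  constructor
  · intro h
    induction p with
    | nil =>
      rcases List.infix_cons_iff.mp h with h1 | h2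
      · cases sub with
        | nil => exact Or.inl List.nil_infix
        | cons x s =>
          rcases List.cons_prefix_cons.mp h1 with ⟨hx, _⟩
          exact absurd (hx ▸ List.mem_cons_self) hn
      · exact Or.inr h2
    | cons a p' ih =>
      rcases List.infix_cons_iff.mp h with h1 | h2
      · exact Or.inl (prefix_of_append_nl hn h1).isInfix
      · rcases ih h2 with h3 | h3
        · exact Or.inl (h3.trans (List.suffix_cons a p').isInfix)
        · exact Or.inr h3
  · rintro (h | h)
    · exact h.trans (List.prefix_append p ('\n' :: r)).isInfix
    · exact h.trans ((List.suffix_cons '\n' r).trans (List.suffix_append p ('\n' :: r))).isInfix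

theorem infix_joinNl {sub : List Char} (hn : '\n' ∉ sub) :
    ∀ (parts : List (List Char)), parts ≠ [] →
      (sub <:+: joinNl parts ↔ ∃ p ∈ parts, sub <:+: p) := by
  intro parts
  induction parts with
  | nil => intro h; exact absurd rfl h
  | cons p ps ih =>
    intro _
    cases ps with
    | nil => simp [joinNl]
    | cons q t =>
      rw [joinNl_cons _ _ (by simp), infix_append_nl hn, ih (by simp)]
      simp only [List.mem_cons]
      constructor
      · rintro (h | ⟨x, hx, h⟩)
        · exact ⟨p, Or.inl rfl, h⟩
        · exact ⟨x, Or.inr hx, h⟩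
      · rintro ⟨x, hx | hx, h⟩
        · exact Or.inl (hx ▸ h)
        · exact Or.inr ⟨x, hx, h⟩

-- substring test distributes over the lines
theorem isIn_eq_any_splitNl (sub cs : List Char) (hn : '\n' ∉ sub) :
    PySem.Chars.isIn sub cs = (splitNl cs).any (fun l => PySem.Chars.isIn sub l) := by
  rw [Bool.eq_iff_iff]
  simp only [List.any_eq_true, PySem.Chars.isIn_iff_infix]
  conv_lhs => rw [← joinNl_splitNl cs]
  exact infix_joinNl hn (splitNl cs) (splitNl_ne_nil cs)

-- lowering commutes with splitting at '\n'
theorem lowerChar_nl : PySem.Chars.lowerChar '\n' = '\n' := by decide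

theorem lowerChar_ne_nl {c : Char} (h : c ≠ '\n') : PySem.Chars.lowerChar c ≠ '\n' := by
  unfold PySem.Chars.lowerChar
  split_ifs with hu
  · intro heq
    simp only [PySem.Chars.isupper, Bool.and_eq_true, decide_eq_true_eq] at hu
    have h1 : 65 ≤ c.toNat := by
      have ha := hu.1
      rw [Char.le_def, UInt32.le_iff_toNat_le] at ha
      have e : ('A').val.toNat = 65 := rfl
      rw [e] at ha
      exact ha
    have h2 : c.toNat ≤ 90 := by
      have hz := hu.2
      rw [Char.le_def, UInt32.le_iff_toNat_le] at hz
      have e : ('Z').val.toNat = 90 := rfl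
      rw [e] at hz
      exact hz
    have h3 : (Char.ofNat (c.toNat + 32)).toNat = c.toNat + 32 := by
      rw [Char.toNat_ofNat, if_pos (Or.inl (by omega))]
    rw [heq] at h3
    have h4 : ('\n').toNat = 10 := rfl
    omega
  · exact h

theorem splitNl_lower (cs : List Char) :
    splitNl (PySem.Chars.lower cs) = (splitNl cs).map PySem.Chars.lower := by
  induction cs with
  | nil => rfl
  | cons c rest ih =>
    rw [show PySem.Chars.lower (c :: rest) = PySem.Chars.lowerChar c :: PySem.Chars.lower rest from rfl]
    by_cases hc : c = '\n'
    · subst hc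
      rw [lowerChar_nl]
      rw [show splitNl ('\n' :: PySem.Chars.lower rest) = [] :: splitNl (PySem.Chars.lower rest) from by
        simp [splitNl]]
      rw [show splitNl ('\n' :: rest) = [] :: splitNl rest from by simp [splitNl]]
      rw [ih]
      rfl
    · rw [show splitNl (PySem.Chars.lowerChar c :: PySem.Chars.lower rest)
            = (splitNl (PySem.Chars.lower rest)).modifyHead (PySem.Chars.lowerChar c :: ·) from by
        simp [splitNl, lowerChar_ne_nl hc]]
      rw [show splitNl (c :: rest) = (splitNl rest).modifyHead (c :: ·) from by simp [splitNl, hc]]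
      rw [ih]
      cases hs : splitNl rest with
      | nil => exact absurd hs (splitNl_ne_nil rest)
      | cons a t => rfl

-- the fold invariant for B's single pass
theorem pvAltStep_eq (st : Bool × Bool × Int × Int) (l : List Char) :
    pvAltStep st l
      = (st.1 || (["terraform", "provider", "resource", "variable", "output"] : List String).any
            (fun k => PySem.Chars.isIn k.toList (PySem.Chars.lower l)),
         st.2.1 || (PySem.Chars.isIn ['{'] l || PySem.Chars.isIn ['}'] l || PySem.Chars.isIn ['='] l),
         (if (!(PySem.Chars.startswith (PySem.Chars.strip l) ['#'])) = true then
            st.2.2.1 + (if (!(PySem.Chars.isIn ['{'] l || PySem.Chars.isIn ['}'] l || PySem.Chars.isIn ['='] l)) = true then 1 else 0)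
          else st.2.2.1),
         (if (!(PySem.Chars.startswith (PySem.Chars.strip l) ['#'])) = true then st.2.2.2 + 1 else st.2.2.2)) := by
  obtain ⟨hk, hh, p, t⟩ := st
  simp only [pvAltStep]
  cases hk <;> split_ifs <;> first | rfl | simp_all

theorem foldl_pvAltStep (L : List (List Char)) :
    ∀ (hk hh : Bool) (p t : Int),
    L.foldl pvAltStep (hk, hh, p, t)
      = (hk || L.any (fun l => (["terraform", "provider", "resource", "variable", "output"] : List String).any
            (fun k => PySem.Chars.isIn k.toList (PySem.Chars.lower l))),
         hh || L.any (fun l => PySem.Chars.isIn ['{'] l || PySem.Chars.isIn ['}'] l || PySem.Chars.isIn ['='] l),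
         p + ((L.filter (fun line => !(PySem.Chars.startswith (PySem.Chars.strip line) ['#']))).map (fun line =>
            if !(PySem.Chars.isIn ['{'] line || PySem.Chars.isIn ['}'] line || PySem.Chars.isIn ['='] line)
            then (1 : Int) else 0)).sum,
         t + ((L.filter (fun line => !(PySem.Chars.startswith (PySem.Chars.strip line) ['#']))).length : Int)) := by
  induction L with
  | nil => intro hk hh p t; simp
  | cons l L ih =>
    intro hk hh p t
    rw [List.foldl_cons, pvAltStep_eq]
    dsimp only
    rw [ih]
    simp only [List.any_cons, List.filter_cons]
    by_cases hb : (!(PySem.Chars.startswith (PySem.Chars.strip l) ['#'])) = true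
    · simp only [if_pos hb, List.map_cons, List.sum_cons, List.length_cons]
      refine congrArg₂ Prod.mk ?_ (congrArg₂ Prod.mk ?_ (congrArg₂ Prod.mk ?_ ?_))
      · rw [Bool.or_assoc]
      · rw [Bool.or_assoc]
      · rw [add_assoc]
      · omega
    · simp only [if_neg hb]
      refine congrArg₂ Prod.mk ?_ (congrArg₂ Prod.mk ?_ (congrArg₂ Prod.mk ?_ ?_))
      · rw [Bool.or_assoc]
      · rw [Bool.or_assoc]
      · rfl
      · rfl

-- boolean any-swap between keywords and lines
theorem any_swap {α β : Type} (xs : List α) (ys : List β) (f : α → β → Bool) :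
    xs.any (fun x => ys.any (fun y => f x y)) = ys.any (fun y => xs.any (fun x => f x y)) := by
  rw [Bool.eq_iff_iff]
  simp only [List.any_eq_true]
  tauto

-- A's whole-content keyword test = per-line test over the split
theorem kw_eq (cs : List Char) :
    (["terraform", "provider", "resource", "variable", "output"] : List String).any
        (fun kw => PySem.Chars.isIn kw.toList (PySem.Chars.lower cs))
      = (splitNl cs).any (fun l => (["terraform", "provider", "resource", "variable", "output"] : List String).any
        (fun k => PySem.Chars.isIn k.toList (PySem.Chars.lower l))) := by
  rw [← any_swap, Bool.eq_iff_iff]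
  simp only [List.any_eq_true]
  apply exists_congr
  intro kw
  constructor
  · rintro ⟨hkw, h⟩
    refine ⟨hkw, ?_⟩
    have hn : '\n' ∉ kw.toList := by fin_cases hkw <;> decide
    rw [isIn_eq_any_splitNl _ _ hn, splitNl_lower, List.any_map] at h
    simpa [Function.comp] using h
  · rintro ⟨hkw, h⟩
    refine ⟨hkw, ?_⟩
    have hn : '\n' ∉ kw.toList := by fin_cases hkw <;> decide
    rw [isIn_eq_any_splitNl _ _ hn, splitNl_lower, List.any_map]
    simpa [Function.comp] using h

-- A's whole-content HCL-char test = per-line test over the split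
theorem hcl_eq (cs : List Char) :
    (["{", "}", "="] : List String).any (fun ch => PySem.Chars.isIn ch.toList cs)
      = (splitNl cs).any (fun l => PySem.Chars.isIn ['{'] l || PySem.Chars.isIn ['}'] l || PySem.Chars.isIn ['='] l) := by
  have h1 := isIn_eq_any_splitNl ['{'] cs (by decide)
  have h2 := isIn_eq_any_splitNl ['}'] cs (by decide)
  have h3 := isIn_eq_any_splitNl ['='] cs (by decide)
  simp only [List.any_cons, List.any_nil, Bool.or_false]
  rw [show ("{" : String).toList = ['{'] from rfl, show ("}" : String).toList = ['}'] from rfl,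
      show ("=" : String).toList = ['='] from rfl, h1, h2, h3]
  rw [Bool.eq_iff_iff]
  simp only [List.any_eq_true, Bool.or_eq_true]
  constructor
  · rintro (⟨x, hx, hp⟩ | ⟨x, hx, hp⟩ | ⟨x, hx, hp⟩)
    exacts [⟨x, hx, Or.inl (Or.inl hp)⟩, ⟨x, hx, Or.inl (Or.inr hp)⟩, ⟨x, hx, Or.inr hp⟩]
  · rintro ⟨x, hx, (hp | hp) | hp⟩
    exacts [Or.inl ⟨x, hx, hp⟩, Or.inr (Or.inl ⟨x, hx, hp⟩), Or.inr (Or.inr ⟨x, hx, hp⟩)]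

-- A's emptiness guard collapses to B's
theorem guard_eq (cs : List Char) :
    (cs.isEmpty || (PySem.Chars.strip cs).isEmpty) = (PySem.Chars.strip cs).isEmpty := by
  cases cs with
  | nil => rfl
  | cons c rest => simp

-- the plain-line indicator functions of the two ports agree
theorem plain_fun_eq :
    (fun line => if !(PySem.Chars.isIn ['{'] line) && !(PySem.Chars.isIn ['}'] line) && !(PySem.Chars.isIn ['='] line)
        then (1 : Int) else 0)
      = (fun line => if !(PySem.Chars.isIn ['{'] line || PySem.Chars.isIn ['}'] line || PySem.Chars.isIn ['='] line)
        then (1 : Int) else 0) := by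
  funext line
  simp [Bool.not_or, Bool.and_assoc]

-- ===== VERDICT (by name: the statement is the Claim_ definition above) =====
theorem is_valid_terraform_content_spec : Claim_equal_is_valid_terraform_content := by
  intro content strict_validation _
  unfold Spec_is_valid_terraform_content
  unfold is_valid_terraform_content is_valid_terraform_content_alt
  rw [guard_eq]
  by_cases h0 : (PySem.Chars.strip content.toList).isEmpty
  · simp [h0]
  · simp only [h0, if_false, Bool.false_eq_true]
    rw [splitOn_eq_splitNl, foldl_pvAltStep]
    rw [kw_eq, hcl_eq, plain_fun_eq]
    set K := (splitNl content.toList).any (fun l =>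
      (["terraform", "provider", "resource", "variable", "output"] : List String).any
        (fun k => PySem.Chars.isIn k.toList (PySem.Chars.lower l))) with hK
    set H := (splitNl content.toList).any (fun l =>
      PySem.Chars.isIn ['{'] l || PySem.Chars.isIn ['}'] l || PySem.Chars.isIn ['='] l) with hH
    set NC := (splitNl content.toList).filter
      (fun line => !(PySem.Chars.startswith (PySem.Chars.strip line) ['#'])) with hNC
    set S : Int := (NC.map (fun line =>
      if !(PySem.Chars.isIn ['{'] line || PySem.Chars.isIn ['}'] line || PySem.Chars.isIn ['='] line)
      then (1 : Int) else 0)).sum with hS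
    simp only [Bool.false_or, zero_add]
    cases strict_validation with
    | false => simp
    | true =>
      by_cases hlen : 0 < NC.length
      · have h1 : (0 : Int) < (NC.length : Int) := by exact_mod_cast hlen
        by_cases hout : (NC.length : Int) < 2 * S
        · simp [hlen, hout]
        · simp [hlen, hout]
      · have h1 : ¬ ((0 : Int) < (NC.length : Int)) := by
          intro hc; exact hlen (by exact_mod_cast hc)
        simp [hlen]
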